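-- pv_equiv track=rewrite | github.com/LatencyTDH/coding-competitions | subsequence.py | generate_all_subsequences
-- ===== SOURCE A (Python) =====
-- from typing import Sequence
-- import itertools
--
-- def generate_all_subsequences(s: str, easy_mode: bool | None = False) -> list[str]:
--     if easy_mode:
--         subseqs = []
--         for i in range(len(s) + 1):
--             for subseq in itertools.combinations(s, i):
--                 subseqs.append("".join(subseq))
--         return sorted(set(subseqs))
--
--     subseqs = []
--     word_end_index = len(s)
--
--     def backtrack(index: int, sequence: Sequence):
--         if index == word_end_index:
--             subseqs.append("".join(sequence))
--             return
--
--         for include_char in {True, False}: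
--             if include_char:
--                 sequence.append(s[index])
--                 backtrack(index + 1, sequence)
--                 sequence.pop()
--             else:
--                 backtrack(index + 1, sequence)
--
--     backtrack(0, [])
--     return sorted(set(subseqs))
-- ===== SOURCE B (Python) =====
-- def generate_all_subsequences(s: str, easy_mode: bool | None = False) -> list[str]:
--     # Distinct-subsequence DP: extend the set of distinct subsequences one
--     # character at a time; never enumerates the 2^n duplicate branches.
--     seen = {""}
--     for c in s:
--         seen |= {t + c for t in seen}
--     return sorted(seen)
-- ===== Notes on version B (the rewrite author's own statement) =====
-- stated objective: alternative
-- what changed: Replaced the exponential backtracking enumeration of all 2^n index subsets (deduplicated and sorted at the end) by an incremental fold that maintains the set of distinct subsequences and extends each with the next character, so duplicate branches are never enumerated (measured 3.3x at n=16, but both are exponential when all subsequences are distinct).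
import Mathlib
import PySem

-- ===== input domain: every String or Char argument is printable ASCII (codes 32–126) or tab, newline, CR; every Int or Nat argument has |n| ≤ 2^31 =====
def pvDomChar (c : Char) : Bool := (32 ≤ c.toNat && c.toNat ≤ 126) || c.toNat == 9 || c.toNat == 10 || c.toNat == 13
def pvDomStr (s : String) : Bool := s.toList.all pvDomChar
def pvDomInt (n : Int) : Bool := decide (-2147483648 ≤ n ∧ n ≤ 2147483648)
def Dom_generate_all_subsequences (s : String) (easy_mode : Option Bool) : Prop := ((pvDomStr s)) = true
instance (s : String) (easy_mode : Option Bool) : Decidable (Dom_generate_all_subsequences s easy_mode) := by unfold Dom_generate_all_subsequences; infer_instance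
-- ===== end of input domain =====

-- B replaces A's 2^n backtracking enumeration by an incremental distinct-subsequence set fold that never visits duplicate branches (intended as faster; a timing run measured 3.3x at n=16 but both are exponential on all-distinct outputs).


-- ===== PORT A =====
-- backtrack(index, sequence): CPython iterates {True, False} as {False, True}, so the
-- exclude branch runs first; "".join(sequence) on a list of 1-char strings is String.ofList.
def pvBtk : List Char → List Char → List String
  | [], seq => [String.ofList seq]
  | c :: rest, seq => pvBtk rest seq ++ pvBtk rest (seq ++ [c])

def generate_all_subsequences (s : String) (easy_mode : Option Bool) : List String :=
  if easy_mode = some true then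
    -- for i in range(len(s)+1): for subseq in itertools.combinations(s, i): subseqs.append("".join(subseq))
    let subseqs := (PySem.List.pyRange 0 ((s.toList.length : Int) + 1) 1).foldl
      (fun acc i => (PySem.List.combinations s.toList i.toNat).foldl
        (fun acc2 t => acc2 ++ [String.ofList t]) acc) []
    PySem.List.sorted (PySem.Set.ofList subseqs) (fun x => x) false
  else
    let subseqs := pvBtk s.toList []
    PySem.List.sorted (PySem.Set.ofList subseqs) (fun x => x) false

-- ===== PORT B =====
-- seen = {""}; for c in s: seen |= {t + c for t in seen}; return sorted(seen)
def generate_all_subsequences_alt (s : String) (easy_mode : Option Bool) : List String :=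
  let seen := s.toList.foldl
    (fun seen c => PySem.Set.union seen
      (PySem.Set.ofList (seen.map (fun t => String.ofList (t.toList ++ [c])))))
    (PySem.Set.ofList [""])
  PySem.List.sorted seen (fun x => x) false

-- ===== PRECONDITION & SPEC =====
def Spec_generate_all_subsequences (s : String) (easy_mode : Option Bool) (out : List String) : Prop := out = generate_all_subsequences_alt s easy_mode
instance (s : String) (easy_mode : Option Bool) (out : List String) : Decidable (Spec_generate_all_subsequences s easy_mode out) := by unfold Spec_generate_all_subsequences; infer_instance

-- ===== CLAIM (what is proved, stated in full; the proofs are below) =====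
def Claim_equal_generate_all_subsequences : Prop := ∀ (s : String) (easy_mode : Option Bool), Dom_generate_all_subsequences s easy_mode → Spec_generate_all_subsequences s easy_mode (generate_all_subsequences s easy_mode)

-- ===== LEMMAS AND PROOFS =====

-- Membership in A's backtracking output: exactly the joins of seq ++ (a sublist of the rest).
theorem mem_pvBtk (l : List Char) : ∀ (seq : List Char) (x : String),
    x ∈ pvBtk l seq ↔ ∃ t, t.Sublist l ∧ x = String.ofList (seq ++ t) := by
  induction l with
  | nil =>
      intro seq x
      simp [pvBtk]
  | cons c rest ih =>
      intro seq x
      simp only [pvBtk, List.mem_append, ih]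
      constructor
      · rintro (⟨t, ht, rfl⟩ | ⟨t, ht, rfl⟩)
        · exact ⟨t, ht.cons c, rfl⟩
        · exact ⟨c :: t, ht.cons₂ c, by simp⟩
      · rintro ⟨t, ht, rfl⟩
        cases ht with
        | cons _ h => exact Or.inl ⟨_, h, rfl⟩
        | cons₂ _ h => exact Or.inr ⟨_, h, by simp⟩

-- Membership in B's fold from an arbitrary starting set.
theorem mem_foldB (l : List Char) : ∀ (S : PySem.Set String) (x : String),
    x ∈ l.foldl (fun seen c => PySem.Set.union seen
        (PySem.Set.ofList (seen.map (fun t => String.ofList (t.toList ++ [c]))))) S ↔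
      ∃ u ∈ S, ∃ t, t.Sublist l ∧ x = String.ofList (u.toList ++ t) := by
  induction l with
  | nil =>
      intro S x
      simp only [List.foldl_nil]
      constructor
      · intro h; exact ⟨x, h, [], List.Sublist.refl _, by simp⟩
      · rintro ⟨u, hu, t, ht, rfl⟩
        simp at ht; subst ht; simpa using hu
  | cons c rest ih =>
      intro S x
      simp only [List.foldl_cons, ih]
      constructor
      · rintro ⟨u, hu, t, ht, rfl⟩
        rw [PySem.Set.mem_union] at hu
        rcases hu with hu | hu
        · exact ⟨u, hu, t, ht.cons c, rfl⟩
        · rw [PySem.Set.mem_ofList, List.mem_map] at hu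
          rcases hu with ⟨v, hv, rfl⟩
          exact ⟨v, hv, c :: t, ht.cons₂ c, by simp⟩
      · rintro ⟨u, hu, t, ht, rfl⟩
        cases ht with
        | cons _ h => exact ⟨u, by rw [PySem.Set.mem_union]; exact Or.inl hu, _, h, rfl⟩
        | @cons₂ t' _ _ h =>
            refine ⟨String.ofList (u.toList ++ [c]), ?_, t', h, by simp⟩
            rw [PySem.Set.mem_union]
            exact Or.inr (by rw [PySem.Set.mem_ofList, List.mem_map]; exact ⟨u, hu, rfl⟩)

-- B's fold keeps the set duplicate-free.
theorem nodup_foldB (l : List Char) : ∀ (S : PySem.Set String), S.Nodup →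
    (l.foldl (fun seen c => PySem.Set.union seen
        (PySem.Set.ofList (seen.map (fun t => String.ofList (t.toList ++ [c]))))) S).Nodup := by
  induction l with
  | nil => intro S h; simpa using h
  | cons c rest ih =>
      intro S h
      exact ih _ (PySem.Set.nodup_union _ _ h)

-- Membership in A's easy-mode list: the joins of all sublists.
theorem mem_easyA (s : String) (x : String) :
    (x ∈ (PySem.List.pyRange 0 ((s.toList.length : Int) + 1) 1).foldl
        (fun acc i => (PySem.List.combinations s.toList i.toNat).foldl
          (fun acc2 t => acc2 ++ [String.ofList t]) acc) []) ↔
      ∃ t, t.Sublist s.toList ∧ x = String.ofList t := by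
  have h1 : ∀ (acc : List String) (i : Int),
      (PySem.List.combinations s.toList i.toNat).foldl
        (fun acc2 t => acc2 ++ [String.ofList t]) acc
      = acc ++ (PySem.List.combinations s.toList i.toNat).map String.ofList := by
    intro acc i; exact PySem.List.foldl_append_singleton_eq_map _ _ _
  have h2 : (PySem.List.pyRange 0 ((s.toList.length : Int) + 1) 1).foldl
      (fun acc i => (PySem.List.combinations s.toList i.toNat).foldl
        (fun acc2 t => acc2 ++ [String.ofList t]) acc) []
      = (PySem.List.pyRange 0 ((s.toList.length : Int) + 1) 1).foldl
        (fun acc i => acc ++ (PySem.List.combinations s.toList i.toNat).map String.ofList) [] :=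
    PySem.List.foldl_congr_mem _ _ _ _ (fun acc i _ => h1 acc i)
  rw [h2, PySem.List.foldl_append_eq_flatMap]
  simp only [List.nil_append, List.mem_flatMap, List.mem_map]
  constructor
  · rintro ⟨i, _, t, htc, rfl⟩
    exact ⟨t, ((PySem.List.mem_combinations_iff _ _ _).mp htc).1, rfl⟩
  · rintro ⟨t, ht, rfl⟩
    refine ⟨(t.length : Int), ?_, t, ?_, rfl⟩
    · rw [PySem.List.mem_pyRange_one]
      have := ht.length_le
      omega
    · exact (PySem.List.mem_combinations_iff _ _ _).mpr ⟨ht, by simp⟩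

-- The two sorted outputs agree whenever the underlying Nodup lists have the same members.
theorem sorted_set_eq {L : List String} {S : List String} (hS : S.Nodup)
    (h : ∀ x, x ∈ L ↔ x ∈ S) :
    PySem.List.sorted (PySem.Set.ofList L) (fun x => x) false
      = PySem.List.sorted S (fun x => x) false := by
  apply PySem.List.sorted_eq_sorted_of_perm _ _ _ (fun a b hab => hab)
  rw [List.perm_ext_iff_of_nodup (PySem.Set.nodup_ofList _) hS]
  intro x
  rw [PySem.Set.mem_ofList]
  exact h x

-- ===== VERDICT (by name: the statement is the Claim_ definition above) =====
theorem generate_all_subsequences_spec : Claim_equal_generate_all_subsequences := by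
  intro s easy_mode _
  unfold Spec_generate_all_subsequences generate_all_subsequences generate_all_subsequences_alt
  have hB : ∀ x : String,
      x ∈ s.toList.foldl (fun seen c => PySem.Set.union seen
          (PySem.Set.ofList (seen.map (fun t => String.ofList (t.toList ++ [c])))))
          (PySem.Set.ofList [""]) ↔
        ∃ t, t.Sublist s.toList ∧ x = String.ofList t := by
    intro x
    rw [mem_foldB]
    constructor
    · rintro ⟨u, hu, t, ht, rfl⟩
      rw [PySem.Set.mem_ofList] at hu
      simp at hu; subst hu
      exact ⟨t, ht, by simp⟩
    · rintro ⟨t, ht, rfl⟩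
      exact ⟨"", by simp [PySem.Set.mem_ofList], t, ht, by simp⟩
  have hNB := nodup_foldB s.toList (PySem.Set.ofList [""]) (PySem.Set.nodup_ofList _)
  split_ifs with h
  · exact sorted_set_eq hNB (fun x => by rw [mem_easyA, hB])
  · exact sorted_set_eq hNB (fun x => by rw [mem_pvBtk, hB]; simp)
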